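-- pv_equiv track=rewrite | github.com/no7hings/lxdcc | script/python/.build/_push_workspace_to_rez_beta.py | get_new_version
-- ===== SOURCE A (Python) =====
-- def get_new_version(version):
--     _ = version.split('.')
--     _.reverse()
--     for seq, i in enumerate(_):
--         if str(i).isdigit():
--             _[seq] = str(int(i) + 1)
--             break
--
--     _.reverse()
--     return '.'.join(_)
-- ===== SOURCE B (Python) =====
-- def get_new_version(version):
--     def bump(parts):
--         # returns the list with the LAST all-digit segment incremented, or None if there is none
--         if not parts:
--             return None
--         head, tail = parts[0], parts[1:]
--         bumped = bump(tail)
--         if bumped is not None: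
--             return [head] + bumped
--         if head.isdigit():
--             return [str(int(head) + 1)] + tail
--         return None
--     parts = version.split('.')
--     new = bump(parts)
--     return '.'.join(parts if new is None else new)
-- ===== Notes on version B (the rewrite author's own statement) =====
-- stated objective: alternative
-- what changed: Replaces A's imperative reverse / increment-first-digit-with-break / reverse pipeline by a structural post-order recursion over the segment list that returns an Optional new list (None when no all-digit segment exists), so the last digit segment is found by recursing first on the tail.
import Mathlib
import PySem

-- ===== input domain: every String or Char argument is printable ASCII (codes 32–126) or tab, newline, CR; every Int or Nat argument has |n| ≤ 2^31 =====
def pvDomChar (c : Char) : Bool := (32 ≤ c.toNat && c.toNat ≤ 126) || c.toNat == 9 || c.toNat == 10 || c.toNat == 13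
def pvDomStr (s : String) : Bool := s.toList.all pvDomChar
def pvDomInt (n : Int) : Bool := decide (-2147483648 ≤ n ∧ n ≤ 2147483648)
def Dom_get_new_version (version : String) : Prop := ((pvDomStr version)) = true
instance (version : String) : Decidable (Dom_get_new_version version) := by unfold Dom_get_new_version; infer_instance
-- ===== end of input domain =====

-- B replaces A's reverse / increment-first-digit-and-break / reverse pipeline by a structural
-- post-order recursion over the segments returning an Option (objective: alternative).

-- ===== PORT A =====
-- str(int(i) + 1); Python's int() cannot fail here because the branch is guarded by isdigit,
-- so ofStr? is always `some` where this helper is applied and the .getD 0 default is never used.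
def pvIncSeg (s : String) : String := PySem.Int.toStr ((PySem.Int.ofStr? s).getD 0 + 1)

-- the 'for … if …: …; break' loop over the reversed list: replace the FIRST digit segment
def pvIncFirst : List String → List String
  | [] => []
  | s :: rest => if PySem.Str.strIsdigit s then pvIncSeg s :: rest else s :: pvIncFirst rest

def get_new_version (version : String) : String :=
  -- split? is `some` because the separator "." is non-empty
  let l := (PySem.Str.split? version ".").getD []
  let l := l.reverse
  let l := pvIncFirst l
  let l := l.reverse
  PySem.Str.join "." l

-- ===== PORT B =====
-- Source B's recursive bump: last all-digit segment incremented, none if there is none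
def pvBump : List String → Option (List String)
  | [] => none
  | head :: tail =>
    match pvBump tail with
    | some r => some (head :: r)
    | none => if PySem.Str.strIsdigit head then some (pvIncSeg head :: tail) else none

def get_new_version_alt (version : String) : String :=
  let parts := (PySem.Str.split? version ".").getD []
  PySem.Str.join "." (match pvBump parts with | none => parts | some r => r)

-- ===== PRECONDITION & SPEC =====
def Spec_get_new_version (version : String) (out : String) : Prop := out = get_new_version_alt version
instance (version : String) (out : String) : Decidable (Spec_get_new_version version out) := by unfold Spec_get_new_version; infer_instance

-- ===== CLAIM (what is proved, stated in full; the proofs are below) =====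
def Claim_equal_get_new_version : Prop := ∀ (version : String), Dom_get_new_version version → Spec_get_new_version version (get_new_version version)

-- ===== LEMMAS AND PROOFS =====

lemma pvBump_append_singleton (ys : List String) (x : String) :
    pvBump (ys ++ [x]) =
      if PySem.Str.strIsdigit x then some (ys ++ [pvIncSeg x])
      else (pvBump ys).map (· ++ [x]) := by
  induction ys with
  | nil =>
      by_cases hx : PySem.Chars.strIsdigit x.toList = true <;>
        simp [pvBump, PySem.Str.strIsdigit, hx]
  | cons y ys ih =>
      simp only [List.cons_append, pvBump, ih, PySem.Str.strIsdigit]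
      by_cases hx : PySem.Chars.strIsdigit x.toList = true
      · simp [hx]
      · simp only [hx, Bool.false_eq_true, if_false]
        cases h : pvBump ys with
        | some r => simp
        | none =>
            simp only [Option.map_none]
            split_ifs <;> simp

lemma pv_main (l : List String) :
    pvIncFirst l.reverse = (match pvBump l with | none => l | some r => r).reverse := by
  induction l using List.reverseRecOn with
  | nil => simp [pvIncFirst, pvBump]
  | append_singleton ys x ih =>
      rw [List.reverse_append, pvBump_append_singleton]
      simp only [List.reverse_cons, List.reverse_nil, List.nil_append,
        List.singleton_append, pvIncFirst, PySem.Str.strIsdigit]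
      by_cases hx : PySem.Chars.strIsdigit x.toList = true
      · simp [hx]
      · simp only [hx, Bool.false_eq_true, if_false]
        cases h : pvBump ys with
        | none => simp [h] at ih ⊢; simp [ih]
        | some r => simp [h] at ih ⊢; simp [ih]

-- ===== VERDICT (by name: the statement is the Claim_ definition above) =====
theorem get_new_version_spec : Claim_equal_get_new_version := by
  intro version _
  simp only [Spec_get_new_version, get_new_version, get_new_version_alt,
    pv_main, List.reverse_reverse]
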